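-- pv_equiv track=rewrite | github.com/sjduan/GraphCroc | IMDB_B/wl_test_util.py | compress_labels
-- ===== SOURCE A (Python) =====
-- def compress_labels(labels):
--     label_map = {}
--     compressed_labels = []
--     for label in labels:
--         if label not in label_map:
--             label_map[label] = len(label_map) + 1
--         compressed_labels.append(label_map[label])
--     return compressed_labels
-- ===== SOURCE B (Python) =====
-- def compress_labels(labels):
--     # id of a label = number of distinct labels in the prefix ending at its
--     # first occurrence; computed per element with no mapping table.
--     return [len(set(labels[:labels.index(l) + 1])) for l in labels]
-- ===== Notes on version B (the rewrite author's own statement) =====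
-- stated objective: alternative
-- what changed: A's stateful build-and-emit loop over a growing id map is replaced by a stateless per-element closed form: each label's id is computed directly as the number of distinct labels in the prefix ending at that label's first occurrence, with no mapping table at all.
import Mathlib
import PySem

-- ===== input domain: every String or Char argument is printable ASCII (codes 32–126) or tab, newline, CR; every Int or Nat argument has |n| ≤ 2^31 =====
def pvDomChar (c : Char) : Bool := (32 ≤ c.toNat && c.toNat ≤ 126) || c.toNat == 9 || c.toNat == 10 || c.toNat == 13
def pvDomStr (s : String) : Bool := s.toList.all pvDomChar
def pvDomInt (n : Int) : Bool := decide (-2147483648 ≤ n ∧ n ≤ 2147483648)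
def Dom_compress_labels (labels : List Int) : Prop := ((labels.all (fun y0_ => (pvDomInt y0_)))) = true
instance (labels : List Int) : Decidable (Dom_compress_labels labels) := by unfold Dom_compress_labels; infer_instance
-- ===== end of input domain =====

-- B replaces A's stateful id-map loop by a stateless per-element closed form
-- (id = distinct-count of the prefix ending at the label's first occurrence); same values.

-- ===== PORT A =====
-- the for-loop of A as structural recursion over the remaining labels;
-- label_map[label] after the conditional insert is always present, so Python's
-- label_map[label] never raises and getD 0 is exact here
def compressLoop (labelMap : PySem.Dict Int Int) (compressed : List Int) : List Int → List Int
  | [] => compressed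
  | label :: rest =>
    let m := if labelMap.contains label = false
             then labelMap.insert label ((labelMap.size : Int) + 1)
             else labelMap
    compressLoop m (compressed ++ [m.getD label 0]) rest

def compress_labels (labels : List Int) : List Int :=
  compressLoop PySem.Dict.empty [] labels

-- ===== PORT B =====
-- len(set(labels[:labels.index(l)+1])) per element; labels.index(l) always succeeds
-- (l is drawn from labels), so getD 0 on index? is exact here
def compress_labels_alt (labels : List Int) : List Int :=
  labels.map (fun l =>
    ((PySem.Set.ofList (PySem.List.slice labels none
        (some (((PySem.List.index? labels l).getD 0 : Int) + 1)))).length : Int))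

-- ===== PRECONDITION & SPEC =====
def Spec_compress_labels (labels : List Int) (out : List Int) : Prop := out = compress_labels_alt labels
instance (labels : List Int) (out : List Int) : Decidable (Spec_compress_labels labels out) := by unfold Spec_compress_labels; infer_instance

-- ===== CLAIM (what is proved, stated in full; the proofs are below) =====
def Claim_equal_compress_labels : Prop := ∀ (labels : List Int), Dom_compress_labels labels → Spec_compress_labels labels (compress_labels labels)

-- ===== LEMMAS AND PROOFS =====

-- 1-based rank of the first occurrence of l in u (spec function shared by both proofs)
def rankIn (l : Int) : List Int → Int
  | [] => 1
  | x :: rest => if x = l then 1 else rankIn l rest + 1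

theorem rankIn_append_of_mem (l : Int) (u t : List Int) (h : l ∈ u) :
    rankIn l (u ++ t) = rankIn l u := by
  induction u with
  | nil => simp at h
  | cons x rest ih =>
    simp only [List.cons_append, rankIn]
    by_cases hx : x = l
    · rw [if_pos hx, if_pos hx]
    · have hr : l ∈ rest := by
        rcases List.mem_cons.mp h with h1 | h1
        · exact absurd h1.symm hx
        · exact h1
      rw [if_neg hx, if_neg hx, ih hr]

theorem rankIn_append_self (l : Int) (u : List Int) (h : l ∉ u) :
    rankIn l (u ++ [l]) = (u.length : Int) + 1 := by
  induction u with
  | nil => simp [rankIn]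
  | cons x rest ih =>
    have hx : x ≠ l := fun he => h (he ▸ List.mem_cons_self)
    have hr : l ∉ rest := fun hm => h (List.mem_cons_of_mem _ hm)
    simp only [List.cons_append, rankIn, if_neg hx, ih hr, List.length_cons]
    push_cast
    ring

theorem foldl_add_prefix (rest : List Int) :
    ∀ u : List Int, ∃ t, rest.foldl PySem.Set.add u = u ++ t := by
  induction rest with
  | nil => intro u; exact ⟨[], by simp⟩
  | cons l rs ih =>
    intro u
    simp only [List.foldl_cons]
    rcases ih (PySem.Set.add u l) with ⟨t, ht⟩
    by_cases hc : l ∈ u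
    · have ha : PySem.Set.add u l = u := by simp [PySem.Set.add, hc]
      exact ⟨t, by rw [ht, ha]⟩
    · have ha : PySem.Set.add u l = u ++ [l] := by simp [PySem.Set.add, hc]
      refine ⟨l :: t, ?_⟩
      rw [ht, ha, List.append_assoc]
      rfl

theorem rankIn_foldl_of_mem (l : Int) (rest u : List Int) (h : l ∈ u) :
    rankIn l (rest.foldl PySem.Set.add u) = rankIn l u := by
  rcases foldl_add_prefix rest u with ⟨t, ht⟩
  rw [ht, rankIn_append_of_mem l u t h]

theorem compressLoop_eq (rest : List Int) :
    ∀ (u : List Int) (m : PySem.Dict Int Int) (out : List Int),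
      (∀ x, m.contains x = true ↔ x ∈ u) →
      (∀ x ∈ u, m.getD x 0 = rankIn x u) →
      ((m.size : Int) = u.length) →
      u.Nodup →
      compressLoop m out rest
        = out ++ rest.map (fun l => rankIn l (rest.foldl PySem.Set.add u)) := by
  induction rest with
  | nil => intro u m out _ _ _ _; simp [compressLoop]
  | cons l rs ih =>
    intro u m out H1 H2 H3 H4
    by_cases hmem : l ∈ u
    · -- l already seen: dict unchanged
      have hc : m.contains l = true := (H1 l).mpr hmem
      have hstep : PySem.Set.add u l = u := by simp [PySem.Set.add, hmem]
      have hif : (if m.contains l = false then m.insert l ((m.size : Int) + 1) else m) = m := by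
        rw [hc]; simp
      simp only [compressLoop]
      rw [hif]
      rw [ih u m (out ++ [m.getD l 0]) H1 H2 H3 H4]
      simp only [List.foldl_cons, hstep, List.map_cons]
      rw [H2 l hmem, rankIn_foldl_of_mem l rs u hmem]
      simp
    · -- new label: insert with id = size + 1
      have hcb : m.contains l = false := by
        cases h : m.contains l with
        | true => exact absurd ((H1 l).mp h) hmem
        | false => rfl
      have hstep : PySem.Set.add u l = u ++ [l] := by simp [PySem.Set.add, hmem]
      set m' := m.insert l ((m.size : Int) + 1) with hm'
      have hmemr : l ∈ u ++ [l] := by simp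
      have H1' : ∀ x, m'.contains x = true ↔ x ∈ u ++ [l] := by
        intro x
        rw [hm', PySem.Dict.contains_insert]
        simp [H1 x, or_comm]
      have Hself : m'.getD l 0 = rankIn l (u ++ [l]) := by
        rw [hm', PySem.Dict.getD_insert, if_pos rfl, rankIn_append_self l u hmem, H3]
      have H2' : ∀ x ∈ u ++ [l], m'.getD x 0 = rankIn x (u ++ [l]) := by
        intro x hx
        by_cases hxl : x = l
        · subst hxl; exact Hself
        · have hxu : x ∈ u := by
            rcases List.mem_append.mp hx with h1 | h1
            · exact h1
            · exact absurd (by simpa using h1) hxl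
          rw [hm', PySem.Dict.getD_insert, if_neg hxl, H2 x hxu,
              rankIn_append_of_mem x u [l] hxu]
      have H3' : ((m'.size : Int) = (u ++ [l]).length) := by
        rw [hm', PySem.Dict.size_insert, hcb]
        simp only [Bool.false_eq_true, if_false, List.length_append, List.length_cons,
          List.length_nil]
        push_cast
        omega
      have H4' : (u ++ [l]).Nodup := by
        refine List.Nodup.append H4 (List.nodup_singleton l) ?_
        intro a ha hb
        have hab : a = l := by simpa using hb
        exact hmem (hab ▸ ha)
      have hif : (if m.contains l = false then m.insert l ((m.size : Int) + 1) else m) = m' := by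
        rw [hcb, if_pos rfl, hm']
      simp only [compressLoop]
      rw [hif]
      rw [ih (u ++ [l]) m' (out ++ [m'.getD l 0]) H1' H2' H3' H4']
      simp only [List.foldl_cons, hstep, List.map_cons]
      rw [Hself, rankIn_foldl_of_mem l rs (u ++ [l]) hmemr]
      simp

theorem compress_labels_eq_rank (labels : List Int) :
    compress_labels labels
      = labels.map (fun l => rankIn l (PySem.Set.ofList labels)) := by
  unfold compress_labels
  rw [compressLoop_eq labels [] PySem.Dict.empty []
      (by intro x; simp [PySem.Dict.contains_empty])
      (by intro x hx; simp at hx)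
      (by simp [PySem.Dict.size_empty])
      List.nodup_nil]
  rfl

-- B's per-element value: on l ∈ labels, the distinct-count of the prefix up to
-- l's first occurrence is l's rank in the deduplicated list
theorem alt_elem_eq_rank (labels : List Int) (l : Int) (hl : l ∈ labels) :
    ((PySem.Set.ofList (PySem.List.slice labels none
        (some (((PySem.List.index? labels l).getD 0 : Int) + 1)))).length : Int)
      = rankIn l (PySem.Set.ofList labels) := by
  obtain ⟨k, hk⟩ := Option.isSome_iff_exists.mp ((PySem.List.index?_isSome_iff labels l).mpr hl)
  obtain ⟨pre, suf, hsplit, hlen, hnotpre⟩ := (PySem.List.index?_eq_some_iff labels l k).mp hk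
  rw [hk]
  have hb : (0:Int) ≤ (k : Int) + 1 := by positivity
  rw [show ((Option.some k).getD 0 : Int) = (k : Int) by rfl]
  rw [PySem.List.slice_to labels hb]
  have htk : ((k : Int) + 1).toNat = pre.length + 1 := by omega
  have htake : labels.take ((k : Int) + 1).toNat = pre ++ [l] := by
    rw [htk, hsplit, List.take_append]
    simp
  rw [htake]
  -- distinct labels of the prefix, with l new at the end
  have hnotofl : l ∉ PySem.Set.ofList pre := by
    rw [PySem.Set.mem_ofList]; exact hnotpre
  have hpre : PySem.Set.ofList (pre ++ [l]) = PySem.Set.ofList pre ++ [l] := by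
    rw [PySem.Set.ofList_append_singleton, PySem.Set.add]
    simp [hnotofl]
  -- the whole list's dedup extends the prefix's dedup
  have hall : ∃ t, PySem.Set.ofList labels = PySem.Set.ofList (pre ++ [l]) ++ t := by
    have h1 : PySem.Set.ofList labels
        = suf.foldl PySem.Set.add (PySem.Set.ofList (pre ++ [l])) := by
      rw [hsplit, show pre ++ l :: suf = (pre ++ [l]) ++ suf by simp,
          PySem.Set.ofList_eq_foldl, PySem.Set.ofList_eq_foldl, List.foldl_append]
    rcases foldl_add_prefix suf (PySem.Set.ofList (pre ++ [l])) with ⟨t, ht⟩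
    exact ⟨t, by rw [h1, ht]⟩
  rcases hall with ⟨t, ht⟩
  have hmeml : l ∈ PySem.Set.ofList (pre ++ [l]) := by
    rw [PySem.Set.mem_ofList]; simp
  rw [ht, rankIn_append_of_mem l _ t hmeml, hpre,
      rankIn_append_self l _ hnotofl]
  simp

theorem compress_labels_alt_eq_rank (labels : List Int) :
    compress_labels_alt labels
      = labels.map (fun l => rankIn l (PySem.Set.ofList labels)) := by
  unfold compress_labels_alt
  exact List.map_congr_left (fun l hl => alt_elem_eq_rank labels l hl)

-- ===== VERDICT (by name: the statement is the Claim_ definition above) =====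
theorem compress_labels_spec : Claim_equal_compress_labels := by
  intro labels _
  unfold Spec_compress_labels
  rw [compress_labels_eq_rank, compress_labels_alt_eq_rank]
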